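-- pv_equiv track=rewrite | github.com/AlexGirardDev/AdventOfPython | src/2018/Day2.py | day2_1
-- ===== SOURCE A (Python) =====
-- def day2_1(arg):
--     two_count = 0
--     three_count = 0
--     for x in arg:
--         letter_dict = {}
--         for y in x:
--             letter_dict[y] = letter_dict[y] + 1 if letter_dict.get(y) else 1
--
--         if any(kvp[1] == 2 for kvp in letter_dict.items()):
--             two_count += 1
--         if any(kvp[1] == 3 for kvp in letter_dict.items()):
--             three_count += 1
--     return three_count * two_count
-- ===== SOURCE B (Python) =====
-- def day2_1(arg):
--     two_count = 0
--     three_count = 0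
--     for x in arg:
--         s = sorted(x)
--         runs = []
--         while s:
--             c = s[0]
--             k = 1
--             while k < len(s) and s[k] == c:
--                 k += 1
--             runs.append(k)
--             s = s[k:]
--         if 2 in runs:
--             two_count += 1
--         if 3 in runs:
--             three_count += 1
--     return three_count * two_count
-- ===== Notes on version B (the rewrite author's own statement) =====
-- stated objective: alternative
-- what changed: Replaces the per-string hash-dict letter tally and dict-items scan with sort-then-scan: sort the characters, collect consecutive run lengths in one pass, and test membership of 2 and 3 in the run-length list.
import Mathlib
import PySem

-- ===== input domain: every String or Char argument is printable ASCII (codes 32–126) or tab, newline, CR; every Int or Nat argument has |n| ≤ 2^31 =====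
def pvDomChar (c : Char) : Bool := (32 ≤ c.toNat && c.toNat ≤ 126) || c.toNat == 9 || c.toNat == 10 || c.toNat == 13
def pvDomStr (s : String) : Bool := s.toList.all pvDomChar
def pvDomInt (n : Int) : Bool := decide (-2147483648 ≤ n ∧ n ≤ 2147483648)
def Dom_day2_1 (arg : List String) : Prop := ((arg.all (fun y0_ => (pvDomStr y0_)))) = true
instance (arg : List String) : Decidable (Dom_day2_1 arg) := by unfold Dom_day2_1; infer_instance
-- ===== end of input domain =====

-- B replaces A's per-string hash-dict letter tally with a sort-then-scan run-length pass (alternative algorithm, same result).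

-- ===== PORT A =====
-- the inner loop body: letter_dict[y] = letter_dict[y] + 1 if letter_dict.get(y) else 1
def letterStep (d : PySem.Dict Char Int) (y : Char) : PySem.Dict Char Int :=
  d.insert y (match d.get? y with
    | some v => if v ≠ 0 then v + 1 else 1
    | none => 1)

def day2_1 (arg : List String) : Int :=
  let r := arg.foldl (fun (acc : Int × Int) x =>
    let letter_dict := x.toList.foldl letterStep PySem.Dict.empty
    let two := if letter_dict.items.any (fun kvp => kvp.2 == 2) then acc.1 + 1 else acc.1
    let three := if letter_dict.items.any (fun kvp => kvp.2 == 3) then acc.2 + 1 else acc.2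
    (two, three)) (0, 0)
  r.2 * r.1

-- ===== PORT B =====
-- the inner while: how many leading elements of the list equal c (k counts the run, starting after s[0])
def runInner (c : Char) : List Char → Nat
  | [] => 0
  | d :: rest => if d == c then runInner c rest + 1 else 0

-- the outer while over s = sorted(x): emit the run length k, continue on s[k:]
def runLengths : List Char → List Nat
  | [] => []
  | c :: rest => (runInner c rest + 1) :: runLengths (rest.drop (runInner c rest))
termination_by l => l.length
decreasing_by
  simp [List.length_drop]

def day2_1_alt (arg : List String) : Int :=
  let r := arg.foldl (fun (acc : Int × Int) x =>
    let runs := runLengths (PySem.List.sorted x.toList (fun c => c) false)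
    ((if 2 ∈ runs then acc.1 + 1 else acc.1), (if 3 ∈ runs then acc.2 + 1 else acc.2))) (0, 0)
  r.2 * r.1

-- ===== PRECONDITION & SPEC =====
def Spec_day2_1 (arg : List String) (out : Int) : Prop := out = day2_1_alt arg
instance (arg : List String) (out : Int) : Decidable (Spec_day2_1 arg out) := by unfold Spec_day2_1; infer_instance

-- ===== CLAIM (what is proved, stated in full; the proofs are below) =====
def Claim_equal_day2_1 : Prop := ∀ (arg : List String), Dom_day2_1 arg → Spec_day2_1 arg (day2_1 arg)

-- ===== LEMMAS AND PROOFS =====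

-- A's dict loop equals the counter: values stay positive, so the truthiness branch is getD+1
lemma letterFold_eq_counter_aux : ∀ (cs : List Char) (d : PySem.Dict Char Int),
    (∀ k v, d.get? k = some v → 0 < v) →
    cs.foldl letterStep d = cs.foldl (fun d x => d.insert x (d.getD x 0 + 1)) d := by
  intro cs
  induction cs with
  | nil => intro d _; rfl
  | cons y cs ih =>
    intro d hinv
    have hstep : letterStep d y = d.insert y (d.getD y 0 + 1) := by
      unfold letterStep
      cases h : d.get? y with
      | none => simp [PySem.Dict.getD_eq_get?_getD, h]
      | some v =>
        have hv := hinv y v h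
        simp [PySem.Dict.getD_eq_get?_getD, h, hv.ne']
    have hinv' : ∀ k v, (d.insert y (d.getD y 0 + 1)).get? k = some v → 0 < v := by
      intro k v hk
      rw [PySem.Dict.get?_insert] at hk
      rcases eq_or_ne k y with rfl | hne
      · rw [if_pos rfl] at hk
        injection hk with hv
        cases h : d.get? k with
        | none => simp [PySem.Dict.getD_eq_get?_getD, h] at hv; omega
        | some w =>
          have := hinv k w h
          simp [PySem.Dict.getD_eq_get?_getD, h] at hv
          omega
      · rw [if_neg hne] at hk
        exact hinv k v hk
    simp only [List.foldl_cons, hstep]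
    exact ih _ hinv'
  
lemma letterFold_eq_counter (cs : List Char) :
    cs.foldl letterStep PySem.Dict.empty = PySem.Dict.counter cs := by
  rw [letterFold_eq_counter_aux cs PySem.Dict.empty (by intro k v h; simp [PySem.Dict.get?_empty] at h)]
  exact PySem.Dict.foldl_insert_getD_add_one_eq_counter cs

-- A's any-over-items test, characterised
lemma anyA_iff (cs : List Char) (n : Nat) :
    ((cs.foldl letterStep PySem.Dict.empty).items.any (fun kvp => kvp.2 == (n : Int)) = true)
    ↔ ∃ c ∈ cs, cs.count c = n := by
  rw [letterFold_eq_counter, PySem.Dict.items_counter]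
  simp only [List.any_eq_true, List.mem_map, PySem.Set.mem_ofList]
  constructor
  · rintro ⟨p, ⟨c, hc, rfl⟩, hb⟩
    refine ⟨c, hc, ?_⟩
    simpa using hb
  · rintro ⟨c, hc, hcount⟩
    exact ⟨(c, (cs.count c : Int)), ⟨c, hc, rfl⟩, by simp [hcount]⟩

-- the first run of a sorted tail: it is all the occurrences of c
lemma run_split : ∀ (rest : List Char) (c : Char),
    (∀ y ∈ rest, c ≤ y) → rest.Pairwise (· ≤ ·) →
    rest.count c = runInner c rest ∧
    (rest.drop (runInner c rest)).Pairwise (· ≤ ·) ∧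
    (∀ d, d ≠ c → rest.count d = (rest.drop (runInner c rest)).count d) ∧
    (∀ d ∈ rest.drop (runInner c rest), d ≠ c ∧ d ∈ rest) := by
  intro rest
  induction rest with
  | nil => intro c _ _; simp [runInner]
  | cons e rest ih =>
    intro c hle hpw
    rcases List.pairwise_cons.mp hpw with ⟨he, hpw'⟩
    by_cases hec : e = c
    · subst hec
      have hle' : ∀ y ∈ rest, e ≤ y := he
      obtain ⟨h1, h2, h3, h4⟩ := ih e hle' hpw'
      refine ⟨?_, ?_, ?_, ?_⟩
      · simp [runInner, h1]
      · simpa [runInner] using h2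
      · intro d hd
        have := h3 d hd
        simp [runInner, Ne.symm hd, this]
      · intro d hd
        simp only [runInner, beq_self_eq_true, if_true, List.drop_succ_cons] at hd
        obtain ⟨hne, hmem⟩ := h4 d hd
        exact ⟨hne, List.mem_cons_of_mem _ hmem⟩
    · have hlt : c < e := lt_of_le_of_ne (hle e (List.mem_cons_self)) (Ne.symm hec)
      have hnotc : c ∉ e :: rest := by
        intro hmem
        rcases List.mem_cons.mp hmem with h | h
        · exact hec h.symm
        · exact absurd (he c h) (not_le.mpr hlt)
      have hrun : runInner c (e :: rest) = 0 := by
        simp [runInner, hec]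
      refine ⟨?_, ?_, ?_, ?_⟩
      · rw [hrun]; simpa using List.count_eq_zero.mpr hnotc
      · rw [hrun]; simpa using hpw
      · intro d _; rw [hrun]; simp
      · intro d hd
        rw [hrun] at hd; simp only [List.drop_zero] at hd
        refine ⟨?_, hd⟩
        intro h; subst h; exact hnotc hd

-- membership in runLengths of a sorted list = some character has exactly that count
lemma mem_runLengths_iff_aux : ∀ (N : Nat) (l : List Char), l.length ≤ N → l.Pairwise (· ≤ ·) → ∀ (n : Nat),
    (n ∈ runLengths l ↔ ∃ c ∈ l, l.count c = n) := by
  intro N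
  induction N with
  | zero =>
    intro l hl _ n
    have : l = [] := List.eq_nil_of_length_eq_zero (by omega)
    subst this; simp [runLengths]
  | succ N ihN =>
    intro l hl hpw n
    cases l with
    | nil => simp [runLengths]
    | cons c rest =>
    have ih : ∀ (h : (rest.drop (runInner c rest)).Pairwise (· ≤ ·)) (n : Nat),
        (n ∈ runLengths (rest.drop (runInner c rest)) ↔
          ∃ d ∈ rest.drop (runInner c rest), (rest.drop (runInner c rest)).count d = n) := by
      intro h n
      exact ihN _ (by simp at hl ⊢; omega) h n
    rcases List.pairwise_cons.mp hpw with ⟨he, hpw'⟩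
    obtain ⟨h1, h2, h3, h4⟩ := run_split rest c he hpw'
    have ihn := ih h2 n
    have hcount_c : (c :: rest).count c = runInner c rest + 1 := by
      simp [h1]
    rw [runLengths]
    simp only [List.mem_cons]
    rw [ihn]
    constructor
    · rintro (rfl | ⟨d, hd, hdc⟩)
      · exact ⟨c, Or.inl rfl, hcount_c⟩
      · obtain ⟨hne, hmem⟩ := h4 d hd
        exact ⟨d, Or.inr hmem,
          by rw [List.count_cons]; simp [Ne.symm hne, h3 d hne, hdc]⟩
    · rintro ⟨d, hd, hdc⟩
      by_cases hdceq : d = c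
      · subst hdceq
        left; rw [hcount_c] at hdc; omega
      · right
        have hmem : d ∈ rest := by
          rcases hd with h | h
          · exact absurd h hdceq
          · exact h
        have hne' : ¬ c = d := fun h => hdceq h.symm
        have hcnt : (c :: rest).count d = (rest.drop (runInner c rest)).count d := by
          simp [hne', h3 d hdceq]
        have hpos : 0 < (rest.drop (runInner c rest)).count d := by
          have h0 : 0 < (c :: rest).count d := List.count_pos_iff.mpr (List.mem_cons.mpr hd)
          omega
        exact ⟨d, List.count_pos_iff.mp hpos, by rw [← hcnt, hdc]⟩

-- the two per-string tests agree
lemma pred_iff (x : String) (n : Nat) :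
    ((x.toList.foldl letterStep PySem.Dict.empty).items.any (fun kvp => kvp.2 == (n : Int)) = true)
    ↔ n ∈ runLengths (PySem.List.sorted x.toList (fun c => c) false) := by
  rw [anyA_iff]
  have hperm : (PySem.List.sorted x.toList (fun c => c) false).Perm x.toList :=
    PySem.List.sorted_perm _ _ _
  have hpw : (PySem.List.sorted x.toList (fun c => c) false).Pairwise (· ≤ ·) := by
    simpa using PySem.List.sorted_pairwise x.toList (fun c => c)
  rw [mem_runLengths_iff_aux (PySem.List.sorted x.toList (fun c => c) false).length _ le_rfl hpw n]
  constructor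
  · rintro ⟨c, hc, hcount⟩
    exact ⟨c, hperm.mem_iff.mpr hc, by rw [hperm.count_eq, hcount]⟩
  · rintro ⟨c, hc, hcount⟩
    exact ⟨c, hperm.mem_iff.mp hc, by rw [← hperm.count_eq, hcount]⟩

-- ===== VERDICT (by name: the statement is the Claim_ definition above) =====
theorem day2_1_spec : Claim_equal_day2_1 := by
  intro arg _
  unfold Spec_day2_1 day2_1 day2_1_alt
  have hfun : (fun (acc : Int × Int) (x : String) =>
      let letter_dict := x.toList.foldl letterStep PySem.Dict.empty
      let two := if letter_dict.items.any (fun kvp => kvp.2 == 2) then acc.1 + 1 else acc.1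
      let three := if letter_dict.items.any (fun kvp => kvp.2 == 3) then acc.2 + 1 else acc.2
      (two, three))
      = (fun (acc : Int × Int) (x : String) =>
      let runs := runLengths (PySem.List.sorted x.toList (fun c => c) false)
      ((if 2 ∈ runs then acc.1 + 1 else acc.1), (if 3 ∈ runs then acc.2 + 1 else acc.2))) := by
    funext acc x
    simp only
    congr 1
    · exact if_congr (pred_iff x 2) rfl rfl
    · exact if_congr (pred_iff x 3) rfl rfl
  simp only [hfun]
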